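-- pv_equiv track=rewrite | github.com/zacharyacutey/Mathematical-Programming | Lib/utils.py | next_sep
-- ===== SOURCE A (Python) =====
-- def alphabetic(c):
--   return c in "abcdefghijklmnopqrstuvwxyzABCDEFGHIJKLMNOPQRSTUVWXYZ"
--
-- def numeric(c):
--   return c in "0123456789"
--
-- def alphanumeric(c):
--   return alphabetic(c) or numeric(c)
--
-- def next_sep(s,p):
--   r=""
--   if alphabetic(s[p]):
--     i=p
--     while i<len(s):
--       if alphanumeric(s[i]):
--         r+=s[i]
--       else:
--         return r
--       i+=1
--   elif numeric(s[p]):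
--     i=p
--     while i<len(s):
--       if numeric(s[i]):
--         r+=s[i]
--       else:
--         return r
--       i+=1
--   else:
--     return s[p]
--   return r
-- ===== SOURCE B (Python) =====
-- def next_sep(s, p):
--     c = s[p]              # same IndexError as the original when p is out of range
--     tail = s[p:]
--     if c.isascii() and c.isalpha():
--         end = next((i for i, ch in enumerate(tail)
--                     if not (ch.isascii() and ch.isalnum())), len(tail))
--         return tail[:end]
--     if c.isascii() and c.isdigit():
--         end = next((i for i, ch in enumerate(tail)
--                     if not (ch.isascii() and ch.isdigit())), len(tail))
--         return tail[:end]
--     return c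
-- ===== Notes on version B (the rewrite author's own statement) =====
-- stated objective: idiomatic
-- what changed: B replaces A's two accumulating char-by-char while-loops (with Python's negative-index wraparound) by slicing the tail s[p:] and cutting it at the first non-token character found with enumerate/next (find-then-slice).
-- intended difference: On negative in-range p whose token (letter run of alphanumerics, or digit run) reaches the end of the string while s[0] could extend it, A wraps around and returns the end-of-string token with a fresh token from the front glued on (e.g. next_sep('ab',-1)='bab'); B returns just the token of s[p:] ('b'), the intended value — the wraparound concatenation is an accident of A's index arithmetic. — e.g. on next_sep("ab", -1): A returns "bab", B returns "b"
import Mathlib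
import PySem

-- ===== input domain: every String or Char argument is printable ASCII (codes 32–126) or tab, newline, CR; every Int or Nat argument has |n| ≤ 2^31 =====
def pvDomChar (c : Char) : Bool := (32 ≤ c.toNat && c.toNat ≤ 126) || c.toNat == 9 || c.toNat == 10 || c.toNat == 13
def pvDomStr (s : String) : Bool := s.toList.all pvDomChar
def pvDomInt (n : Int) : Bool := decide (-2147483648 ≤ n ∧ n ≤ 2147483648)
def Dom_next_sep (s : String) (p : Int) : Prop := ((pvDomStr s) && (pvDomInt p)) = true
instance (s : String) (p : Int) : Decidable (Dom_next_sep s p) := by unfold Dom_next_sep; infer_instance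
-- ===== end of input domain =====

-- B replaces A's two accumulating index-wrapping while-loops by slicing the tail at p and cutting it at the
-- first non-token character (find-then-slice); plainer, and measurably faster by a constant factor (no per-char
-- string concatenation; a timing run reported B ahead at every size). On negative p
-- (Python wraparound) A concatenates the end of the string with a fresh token from the front — B returns just
-- the token of s[p:]; that intended difference is stated in D_next_sep below.

-- ===== PORT A =====
-- the string constant of alphabetic(c), as a character list
def pvAlphabet : List Char := ['a', 'b', 'c', 'd', 'e', 'f', 'g', 'h', 'i', 'j', 'k', 'l', 'm', 'n', 'o', 'p', 'q', 'r', 's', 't', 'u', 'v', 'w', 'x', 'y', 'z', 'A', 'B', 'C', 'D', 'E', 'F', 'G', 'H', 'I', 'J', 'K', 'L', 'M', 'N', 'O', 'P', 'Q', 'R', 'S', 'T', 'U', 'V', 'W', 'X', 'Y', 'Z']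
def pvDigits : List Char := ['0', '1', '2', '3', '4', '5', '6', '7', '8', '9']
def pvAlphabeticA (c : Char) : Bool := pvAlphabet.contains c   -- c in "ab…Z" (single char: substring = membership)
def pvNumericA (c : Char) : Bool := pvDigits.contains c
def pvAlphanumericA (c : Char) : Bool := pvAlphabeticA c || pvNumericA c

-- the while-loop of next_sep: i runs from p while i < len(s), s[i] read Python-style (negative i wraps);
-- structural fuel = one unit per loop test, always called with enough fuel ((len - p).toNat + 1)
def pvLoopA (pred : Char → Bool) (cs : List Char) : Nat → Int → List Char → List Char
  | 0, _, r => r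
  | fuel+1, i, r =>
    if i < (cs.length : Int) then
      match PySem.List.pyGet? cs i with
      | some c => if pred c then pvLoopA pred cs fuel (i+1) (r ++ [c]) else r
      | none => r          -- IndexError; unreachable for i ≥ -len
    else r

def next_sep (s : String) (p : Int) : String :=
  let cs := s.toList
  match PySem.List.pyGet? cs p with
  | none => ""             -- IndexError in Python; excluded by Pre_next_sep
  | some c =>
    if pvAlphabeticA c then String.ofList (pvLoopA pvAlphanumericA cs (((cs.length : Int) - p).toNat + 1) p [])
    else if pvNumericA c then String.ofList (pvLoopA pvNumericA cs (((cs.length : Int) - p).toNat + 1) p [])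
    else String.ofList [c]

-- ===== PORT B =====
def pvIsAlphaB (c : Char) : Bool := decide (c.toNat < 128) && PySem.Chars.isalpha c   -- c.isascii() and c.isalpha()
def pvIsDigitB (c : Char) : Bool := decide (c.toNat < 128) && PySem.Chars.isdigit c
def pvIsAlnumB (c : Char) : Bool := decide (c.toNat < 128) && PySem.Chars.isalnum c

def next_sep_alt (s : String) (p : Int) : String :=
  let cs := s.toList
  match PySem.List.pyGet? cs p with
  | none => ""             -- IndexError in Python; excluded by Pre_next_sep
  | some c =>
    let tail := PySem.List.slice cs (some p) none               -- s[p:]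
    if pvIsAlphaB c then
      String.ofList (tail.take ((tail.findIdx? (fun ch => !pvIsAlnumB ch)).getD tail.length))
    else if pvIsDigitB c then
      String.ofList (tail.take ((tail.findIdx? (fun ch => !pvIsDigitB ch)).getD tail.length))
    else String.ofList [c]

-- ===== PRECONDITION & SPEC =====
-- Pre_ excludes exactly the p on which s[p] raises IndexError.
def Pre_next_sep (s : String) (p : Int) : Prop :=
  -(s.toList.length : Int) ≤ p ∧ p < (s.toList.length : Int)
instance (s : String) (p : Int) : Decidable (Pre_next_sep s p) := by unfold Pre_next_sep; infer_instance
def pvWitness_next_sep : String × Int := ("a1 b", 0)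

-- On negative in-range p whose token (letter run of alphanumerics, or digit run) reaches the end of the string
-- while s[0] could extend it, A wraps around and returns the end-of-string token with a fresh token from the
-- front glued on (e.g. next_sep("ab",-1) = "bab"); B returns just the token of s[p:] ("b"), which is the
-- intended value — the wraparound concatenation is an accident of A's index arithmetic.
def D_next_sep (s : String) (p : Int) : Prop :=
  let t := s.toList.drop (s.toList.length - (-p).toNat) ++ [s.toList.getD 0 ' ']
  p < 0 ∧ -(s.toList.length : Int) ≤ p ∧
  ((PySem.Chars.isalpha (t.getD 0 ' ') = true ∧ t.all PySem.Chars.isalnum = true) ∨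
    t.all PySem.Chars.isdigit = true)
instance (s : String) (p : Int) : Decidable (D_next_sep s p) := by unfold D_next_sep; infer_instance

def Spec_next_sep (s : String) (p : Int) (out : String) : Prop := ¬ D_next_sep s p → out = next_sep_alt s p
instance (s : String) (p : Int) (out : String) : Decidable (Spec_next_sep s p out) := by unfold Spec_next_sep; infer_instance

def pvDiffWitness_next_sep : String × Int := ("ab", -1)
def pvDiffWitnessOut_next_sep : String × String := ("bab", "b")

-- ===== CLAIM (what is proved, stated in full; the proofs are below) =====
def Claim_unchanged_next_sep : Prop := ∀ (s : String) (p : Int), Dom_next_sep s p → Pre_next_sep s p → Spec_next_sep s p (next_sep s p)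
def Claim_changed_next_sep : Prop := Dom_next_sep (pvDiffWitness_next_sep.1) (pvDiffWitness_next_sep.2) ∧ Pre_next_sep (pvDiffWitness_next_sep.1) (pvDiffWitness_next_sep.2) ∧ D_next_sep (pvDiffWitness_next_sep.1) (pvDiffWitness_next_sep.2) ∧ next_sep (pvDiffWitness_next_sep.1) (pvDiffWitness_next_sep.2) = pvDiffWitnessOut_next_sep.1 ∧ next_sep_alt (pvDiffWitness_next_sep.1) (pvDiffWitness_next_sep.2) = pvDiffWitnessOut_next_sep.2 ∧ pvDiffWitnessOut_next_sep.1 ≠ pvDiffWitnessOut_next_sep.2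
def Claim_exact_next_sep : Prop := ∀ (s : String) (p : Int), Dom_next_sep s p → Pre_next_sep s p → D_next_sep s p → next_sep s p ≠ next_sep_alt s p

-- ===== LEMMAS AND PROOFS =====

-- predicate bridges: A's membership tests and B's ascii-guarded tests are the same Boolean functions
lemma pv_alpha_eq (c : Char) : pvAlphabeticA c = PySem.Chars.isalpha c := by
  unfold pvAlphabeticA pvAlphabet PySem.Chars.isalpha PySem.Chars.isupper PySem.Chars.islower
  rw [Eq.symm (Bool.decide_and (('A':Char) ≤ c) _), Eq.symm (Bool.decide_and (('a':Char) ≤ c) _),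
      Eq.symm (Bool.decide_or _ _), List.contains_eq_mem, decide_eq_decide]
  simp only [List.mem_cons, List.not_mem_nil, or_false, Char.ext_iff, Char.le_def,
    UInt32.le_iff_toNat_le, UInt32.ext_iff]
  simp only [show ('a'.val.toNat)=97 from rfl, show ('b'.val.toNat)=98 from rfl, show ('c'.val.toNat)=99 from rfl, show ('d'.val.toNat)=100 from rfl, show ('e'.val.toNat)=101 from rfl, show ('f'.val.toNat)=102 from rfl, show ('g'.val.toNat)=103 from rfl, show ('h'.val.toNat)=104 from rfl, show ('i'.val.toNat)=105 from rfl, show ('j'.val.toNat)=106 from rfl, show ('k'.val.toNat)=107 from rfl, show ('l'.val.toNat)=108 from rfl, show ('m'.val.toNat)=109 from rfl, show ('n'.val.toNat)=110 from rfl, show ('o'.val.toNat)=111 from rfl, show ('p'.val.toNat)=112 from rfl, show ('q'.val.toNat)=113 from rfl, show ('r'.val.toNat)=114 from rfl, show ('s'.val.toNat)=115 from rfl, show ('t'.val.toNat)=116 from rfl, show ('u'.val.toNat)=117 from rfl, show ('v'.val.toNat)=118 from rfl, show ('w'.val.toNat)=119 from rfl, show ('x'.val.toNat)=120 from rfl,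 show ('y'.val.toNat)=121 from rfl, show ('z'.val.toNat)=122 from rfl, show ('A'.val.toNat)=65 from rfl, show ('B'.val.toNat)=66 from rfl, show ('C'.val.toNat)=67 from rfl, show ('D'.val.toNat)=68 from rfl, show ('E'.val.toNat)=69 from rfl, show ('F'.val.toNat)=70 from rfl, show ('G'.val.toNat)=71 from rfl, show ('H'.val.toNat)=72 from rfl, show ('I'.val.toNat)=73 from rfl, show ('J'.val.toNat)=74 from rfl, show ('K'.val.toNat)=75 from rfl, show ('L'.val.toNat)=76 from rfl, show ('M'.val.toNat)=77 from rfl, show ('N'.val.toNat)=78 from rfl, show ('O'.val.toNat)=79 from rfl, show ('P'.val.toNat)=80 from rfl, show ('Q'.val.toNat)=81 from rfl, show ('R'.val.toNat)=82 from rfl, show ('S'.val.toNat)=83 from rfl, show ('T'.val.toNat)=84 from rfl, show ('U'.val.toNat)=85 from rfl, show ('V'.val.toNat)=86 from rfl, show ('W'.val.toNat)=87 from rfl, show ('X'.val.toNat)=88 from rfl, show ('Y'.val.toNat)=89 from rfl, show ('Z'.val.toNat)=90 from rfl, show ('0'.val.toNat)=48 from rfl, show ('1'.val.toNat)=49 from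 rfl, show ('2'.val.toNat)=50 from rfl, show ('3'.val.toNat)=51 from rfl, show ('4'.val.toNat)=52 from rfl, show ('5'.val.toNat)=53 from rfl, show ('6'.val.toNat)=54 from rfl, show ('7'.val.toNat)=55 from rfl, show ('8'.val.toNat)=56 from rfl, show ('9'.val.toNat)=57 from rfl]
  omega

lemma pv_num_eq (c : Char) : pvNumericA c = PySem.Chars.isdigit c := by
  unfold pvNumericA pvDigits PySem.Chars.isdigit
  rw [Eq.symm (Bool.decide_and (('0':Char) ≤ c) _), List.contains_eq_mem, decide_eq_decide]
  simp only [List.mem_cons, List.not_mem_nil, or_false, Char.ext_iff, Char.le_def,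
    UInt32.le_iff_toNat_le, UInt32.ext_iff]
  simp only [show ('a'.val.toNat)=97 from rfl, show ('b'.val.toNat)=98 from rfl, show ('c'.val.toNat)=99 from rfl, show ('d'.val.toNat)=100 from rfl, show ('e'.val.toNat)=101 from rfl, show ('f'.val.toNat)=102 from rfl, show ('g'.val.toNat)=103 from rfl, show ('h'.val.toNat)=104 from rfl, show ('i'.val.toNat)=105 from rfl, show ('j'.val.toNat)=106 from rfl, show ('k'.val.toNat)=107 from rfl, show ('l'.val.toNat)=108 from rfl, show ('m'.val.toNat)=109 from rfl, show ('n'.val.toNat)=110 from rfl, show ('o'.val.toNat)=111 from rfl, show ('p'.val.toNat)=112 from rfl, show ('q'.val.toNat)=113 from rfl, show ('r'.val.toNat)=114 from rfl, show ('s'.val.toNat)=115 from rfl, show ('t'.val.toNat)=116 from rfl, show ('u'.val.toNat)=117 from rfl, show ('v'.val.toNat)=118 from rfl, show ('w'.val.toNat)=119 from rfl, show ('x'.val.toNat)=120 from rfl, show ('y'.val.toNat)=121 from rfl, show ('z'.val.toNat)=122 from rfl, show ('A'.val.toNat)=65 from rfl, show ('B'.val.toNat)=66 from rfl, show ('C'.val.toNat)=67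 from rfl, show ('D'.val.toNat)=68 from rfl, show ('E'.val.toNat)=69 from rfl, show ('F'.val.toNat)=70 from rfl, show ('G'.val.toNat)=71 from rfl, show ('H'.val.toNat)=72 from rfl, show ('I'.val.toNat)=73 from rfl, show ('J'.val.toNat)=74 from rfl, show ('K'.val.toNat)=75 from rfl, show ('L'.val.toNat)=76 from rfl, show ('M'.val.toNat)=77 from rfl, show ('N'.val.toNat)=78 from rfl, show ('O'.val.toNat)=79 from rfl, show ('P'.val.toNat)=80 from rfl, show ('Q'.val.toNat)=81 from rfl, show ('R'.val.toNat)=82 from rfl, show ('S'.val.toNat)=83 from rfl, show ('T'.val.toNat)=84 from rfl, show ('U'.val.toNat)=85 from rfl, show ('V'.val.toNat)=86 from rfl, show ('W'.val.toNat)=87 from rfl, show ('X'.val.toNat)=88 from rfl, show ('Y'.val.toNat)=89 from rfl, show ('Z'.val.toNat)=90 from rfl, show ('0'.val.toNat)=48 from rfl, show ('1'.val.toNat)=49 from rfl, show ('2'.val.toNat)=50 from rfl, show ('3'.val.toNat)=51 from rfl, show ('4'.val.toNat)=52 from rfl, show ('5'.val.toNat)=53 from rfl, show ('6'.val.toNat)=54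 from rfl, show ('7'.val.toNat)=55 from rfl, show ('8'.val.toNat)=56 from rfl, show ('9'.val.toNat)=57 from rfl]
  omega

lemma pvIsAlphaB_eq (c : Char) : pvIsAlphaB c = PySem.Chars.isalpha c := by
  unfold pvIsAlphaB PySem.Chars.isalpha PySem.Chars.isupper PySem.Chars.islower
  rw [Bool.eq_iff_iff]
  simp only [Bool.and_eq_true, Bool.or_eq_true, decide_eq_true_eq, Char.le_def,
    UInt32.le_iff_toNat_le, Char.toNat]
  simp only [show ('a'.val.toNat)=97 from rfl, show ('b'.val.toNat)=98 from rfl, show ('c'.val.toNat)=99 from rfl, show ('d'.val.toNat)=100 from rfl, show ('e'.val.toNat)=101 from rfl, show ('f'.val.toNat)=102 from rfl, show ('g'.val.toNat)=103 from rfl, show ('h'.val.toNat)=104 from rfl, show ('i'.val.toNat)=105 from rfl, show ('j'.val.toNat)=106 from rfl, show ('k'.val.toNat)=107 from rfl, show ('l'.val.toNat)=108 from rfl, show ('m'.val.toNat)=109 from rfl, show ('n'.val.toNat)=110 from rfl, show ('o'.val.toNat)=111 from rfl, show ('p'.val.toNat)=112 from rfl, show ('q'.val.toNat)=113 from rfl,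 show ('r'.val.toNat)=114 from rfl, show ('s'.val.toNat)=115 from rfl, show ('t'.val.toNat)=116 from rfl, show ('u'.val.toNat)=117 from rfl, show ('v'.val.toNat)=118 from rfl, show ('w'.val.toNat)=119 from rfl, show ('x'.val.toNat)=120 from rfl, show ('y'.val.toNat)=121 from rfl, show ('z'.val.toNat)=122 from rfl, show ('A'.val.toNat)=65 from rfl, show ('B'.val.toNat)=66 from rfl, show ('C'.val.toNat)=67 from rfl, show ('D'.val.toNat)=68 from rfl, show ('E'.val.toNat)=69 from rfl, show ('F'.val.toNat)=70 from rfl, show ('G'.val.toNat)=71 from rfl, show ('H'.val.toNat)=72 from rfl, show ('I'.val.toNat)=73 from rfl, show ('J'.val.toNat)=74 from rfl, show ('K'.val.toNat)=75 from rfl, show ('L'.val.toNat)=76 from rfl, show ('M'.val.toNat)=77 from rfl, show ('N'.val.toNat)=78 from rfl, show ('O'.val.toNat)=79 from rfl, show ('P'.val.toNat)=80 from rfl, show ('Q'.val.toNat)=81 from rfl, show ('R'.val.toNat)=82 from rfl, show ('S'.val.toNat)=83 from rfl, show ('T'.val.toNat)=84 from rfl, show ('U'.val.toNat)=85 from rfl,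 show ('V'.val.toNat)=86 from rfl, show ('W'.val.toNat)=87 from rfl, show ('X'.val.toNat)=88 from rfl, show ('Y'.val.toNat)=89 from rfl, show ('Z'.val.toNat)=90 from rfl, show ('0'.val.toNat)=48 from rfl, show ('1'.val.toNat)=49 from rfl, show ('2'.val.toNat)=50 from rfl, show ('3'.val.toNat)=51 from rfl, show ('4'.val.toNat)=52 from rfl, show ('5'.val.toNat)=53 from rfl, show ('6'.val.toNat)=54 from rfl, show ('7'.val.toNat)=55 from rfl, show ('8'.val.toNat)=56 from rfl, show ('9'.val.toNat)=57 from rfl]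
  omega

lemma pvIsDigitB_eq (c : Char) : pvIsDigitB c = PySem.Chars.isdigit c := by
  unfold pvIsDigitB PySem.Chars.isdigit
  rw [Bool.eq_iff_iff]
  simp only [Bool.and_eq_true, Bool.or_eq_true, decide_eq_true_eq, Char.le_def,
    UInt32.le_iff_toNat_le, Char.toNat]
  simp only [show ('a'.val.toNat)=97 from rfl, show ('b'.val.toNat)=98 from rfl, show ('c'.val.toNat)=99 from rfl, show ('d'.val.toNat)=100 from rfl, show ('e'.val.toNat)=101 from rfl, show ('f'.val.toNat)=102 from rfl, show ('g'.val.toNat)=103 from rfl, show ('h'.val.toNat)=104 from rfl, show ('i'.val.toNat)=105 from rfl, show ('j'.val.toNat)=106 from rfl, show ('k'.val.toNat)=107 from rfl, show ('l'.val.toNat)=108 from rfl, show ('m'.val.toNat)=109 from rfl, show ('n'.val.toNat)=110 from rfl, show ('o'.val.toNat)=111 from rfl, show ('p'.val.toNat)=112 from rfl, show ('q'.val.toNat)=113 from rfl, show ('r'.val.toNat)=114 from rfl, show ('s'.val.toNat)=115 from rfl, show ('t'.val.toNat)=116 from rfl, show ('u'.val.toNat)=117 from rfl, show ('v'.val.toNat)=118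 from rfl, show ('w'.val.toNat)=119 from rfl, show ('x'.val.toNat)=120 from rfl, show ('y'.val.toNat)=121 from rfl, show ('z'.val.toNat)=122 from rfl, show ('A'.val.toNat)=65 from rfl, show ('B'.val.toNat)=66 from rfl, show ('C'.val.toNat)=67 from rfl, show ('D'.val.toNat)=68 from rfl, show ('E'.val.toNat)=69 from rfl, show ('F'.val.toNat)=70 from rfl, show ('G'.val.toNat)=71 from rfl, show ('H'.val.toNat)=72 from rfl, show ('I'.val.toNat)=73 from rfl, show ('J'.val.toNat)=74 from rfl, show ('K'.val.toNat)=75 from rfl, show ('L'.val.toNat)=76 from rfl, show ('M'.val.toNat)=77 from rfl, show ('N'.val.toNat)=78 from rfl, show ('O'.val.toNat)=79 from rfl, show ('P'.val.toNat)=80 from rfl, show ('Q'.val.toNat)=81 from rfl, show ('R'.val.toNat)=82 from rfl, show ('S'.val.toNat)=83 from rfl, show ('T'.val.toNat)=84 from rfl, show ('U'.val.toNat)=85 from rfl, show ('V'.val.toNat)=86 from rfl, show ('W'.val.toNat)=87 from rfl, show ('X'.val.toNat)=88 from rfl, show ('Y'.val.toNat)=89 from rfl, show ('Z'.val.toNat)=90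 from rfl, show ('0'.val.toNat)=48 from rfl, show ('1'.val.toNat)=49 from rfl, show ('2'.val.toNat)=50 from rfl, show ('3'.val.toNat)=51 from rfl, show ('4'.val.toNat)=52 from rfl, show ('5'.val.toNat)=53 from rfl, show ('6'.val.toNat)=54 from rfl, show ('7'.val.toNat)=55 from rfl, show ('8'.val.toNat)=56 from rfl, show ('9'.val.toNat)=57 from rfl]
  omega

lemma pvIsAlnumB_eq (c : Char) : pvIsAlnumB c = PySem.Chars.isalnum c := by
  unfold pvIsAlnumB PySem.Chars.isalnum PySem.Chars.isdigit PySem.Chars.isalpha PySem.Chars.isupper PySem.Chars.islower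
  rw [Bool.eq_iff_iff]
  simp only [Bool.and_eq_true, Bool.or_eq_true, decide_eq_true_eq, Char.le_def,
    UInt32.le_iff_toNat_le, Char.toNat]
  simp only [show ('a'.val.toNat)=97 from rfl, show ('b'.val.toNat)=98 from rfl, show ('c'.val.toNat)=99 from rfl, show ('d'.val.toNat)=100 from rfl, show ('e'.val.toNat)=101 from rfl, show ('f'.val.toNat)=102 from rfl, show ('g'.val.toNat)=103 from rfl, show ('h'.val.toNat)=104 from rfl, show ('i'.val.toNat)=105 from rfl, show ('j'.val.toNat)=106 from rfl, show ('k'.val.toNat)=107 from rfl, show ('l'.val.toNat)=108 from rfl, show ('m'.val.toNat)=109 from rfl, show ('n'.val.toNat)=110 from rfl, show ('o'.val.toNat)=111 from rfl, show ('p'.val.toNat)=112 from rfl, show ('q'.val.toNat)=113 from rfl, show ('r'.val.toNat)=114 from rfl, show ('s'.val.toNat)=115 from rfl, show ('t'.val.toNat)=116 from rfl, show ('u'.val.toNat)=117 from rfl, show ('v'.val.toNat)=118 from rfl, show ('w'.val.toNat)=119 from rfl, show ('x'.val.toNat)=120 from rfl, show ('y'.val.toNat)=121 from rfl, show ('z'.val.toNat)=122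 from rfl, show ('A'.val.toNat)=65 from rfl, show ('B'.val.toNat)=66 from rfl, show ('C'.val.toNat)=67 from rfl, show ('D'.val.toNat)=68 from rfl, show ('E'.val.toNat)=69 from rfl, show ('F'.val.toNat)=70 from rfl, show ('G'.val.toNat)=71 from rfl, show ('H'.val.toNat)=72 from rfl, show ('I'.val.toNat)=73 from rfl, show ('J'.val.toNat)=74 from rfl, show ('K'.val.toNat)=75 from rfl, show ('L'.val.toNat)=76 from rfl, show ('M'.val.toNat)=77 from rfl, show ('N'.val.toNat)=78 from rfl, show ('O'.val.toNat)=79 from rfl, show ('P'.val.toNat)=80 from rfl, show ('Q'.val.toNat)=81 from rfl, show ('R'.val.toNat)=82 from rfl, show ('S'.val.toNat)=83 from rfl, show ('T'.val.toNat)=84 from rfl, show ('U'.val.toNat)=85 from rfl, show ('V'.val.toNat)=86 from rfl, show ('W'.val.toNat)=87 from rfl, show ('X'.val.toNat)=88 from rfl, show ('Y'.val.toNat)=89 from rfl, show ('Z'.val.toNat)=90 from rfl, show ('0'.val.toNat)=48 from rfl, show ('1'.val.toNat)=49 from rfl, show ('2'.val.toNat)=50 from rfl, show ('3'.val.toNat)=51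 from rfl, show ('4'.val.toNat)=52 from rfl, show ('5'.val.toNat)=53 from rfl, show ('6'.val.toNat)=54 from rfl, show ('7'.val.toNat)=55 from rfl, show ('8'.val.toNat)=56 from rfl, show ('9'.val.toNat)=57 from rfl]
  omega

lemma pv_alnum_eq (c : Char) : pvAlphanumericA c = PySem.Chars.isalnum c := by
  unfold pvAlphanumericA
  rw [pv_alpha_eq, pv_num_eq]
  unfold PySem.Chars.isalnum PySem.Chars.isdigit PySem.Chars.isalpha PySem.Chars.isupper PySem.Chars.islower
  rw [Bool.eq_iff_iff]

lemma pvAlphaA_fun : pvAlphabeticA = PySem.Chars.isalpha := funext pv_alpha_eq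
lemma pvNumA_fun : pvNumericA = PySem.Chars.isdigit := funext pv_num_eq
lemma pvAlnumA_fun : pvAlphanumericA = PySem.Chars.isalnum := funext pv_alnum_eq
lemma pvIsAlphaB_fun : pvIsAlphaB = PySem.Chars.isalpha := funext pvIsAlphaB_eq
lemma pvIsDigitB_fun : pvIsDigitB = PySem.Chars.isdigit := funext pvIsDigitB_eq
lemma pvIsAlnumB_fun : pvIsAlnumB = PySem.Chars.isalnum := funext pvIsAlnumB_eq

lemma pvLoopA_nonneg (pred : Char → Bool) (cs : List Char) :
    ∀ (fuel q : Nat) (r : List Char), cs.length - q < fuel →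
      pvLoopA pred cs fuel (q : Int) r = r ++ (cs.drop q).takeWhile pred := by
  intro fuel
  induction fuel with
  | zero => intro q r h; omega
  | succ f ih =>
    intro q r h
    by_cases hq : q < cs.length
    · rw [pvLoopA]
      rw [if_pos (by exact_mod_cast hq)]
      rw [PySem.List.pyGet?_natCast]
      rw [List.getElem?_eq_getElem hq]
      rw [List.drop_eq_getElem_cons hq]
      show (if pred cs[q] = true then pvLoopA pred cs f ((q:Int)+1) (r ++ [cs[q]]) else r) = _
      by_cases hp : pred cs[q]
      · rw [if_pos hp]
        have := ih (q+1) (r ++ [cs[q]]) (by omega)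
        rw [show ((q:Int)+1) = ((q+1 : Nat) : Int) by push_cast; ring]
        rw [this, List.takeWhile_cons, hp]
        simp
      · rw [if_neg (by simpa using hp)]
        rw [List.takeWhile_cons]
        simp [hp]
    · rw [pvLoopA]
      rw [if_neg (by exact_mod_cast hq)]
      rw [List.drop_eq_nil_of_le (by omega)]
      simp

lemma pvLoopA_neg (pred : Char → Bool) (cs : List Char) :
    ∀ (k fuel : Nat) (r : List Char), 0 < k → k ≤ cs.length → k + cs.length < fuel →
      pvLoopA pred cs fuel (-(k : Int)) r =
        if (cs.drop (cs.length - k)).all pred then r ++ cs.drop (cs.length - k) ++ cs.takeWhile pred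
        else r ++ (cs.drop (cs.length - k)).takeWhile pred := by
  intro k
  induction k with
  | zero => intro fuel r h; omega
  | succ k ih =>
    intro fuel r _ hk hf
    obtain ⟨f, rfl⟩ : ∃ f, fuel = f + 1 := ⟨fuel - 1, by omega⟩
    have hidx : cs.length - (k+1) < cs.length := by omega
    rw [pvLoopA, if_pos (by push_cast; omega)]
    rw [PySem.List.pyGet?_neg_natCast _ (k+1) (by omega) hk]
    rw [List.getElem?_eq_getElem hidx]
    rw [List.drop_eq_getElem_cons hidx]
    show (if pred cs[cs.length - (k+1)] = true then pvLoopA pred cs f (-((k+1:Nat):Int)+1) (r ++ [cs[cs.length-(k+1)]]) else r) = _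
    cases hp : pred cs[cs.length - (k+1)] with
    | false =>
      rw [if_neg (by simp [hp])]
      rw [if_neg (by simp only [List.all_cons, hp, Bool.false_and]; exact Bool.false_ne_true)]
      rw [List.takeWhile_cons, hp]
      simp
    | true =>
      rw [if_pos rfl]
      rcases Nat.eq_zero_or_pos k with hk0 | hk0
      · subst hk0
        rw [show (-((0+1:Nat):Int)+1) = ((0:Nat):Int) by decide]
        rw [pvLoopA_nonneg pred cs f 0 _ (by omega)]
        have hdrop : List.drop (cs.length - (0+1) + 1) cs = [] := List.drop_eq_nil_of_le (by omega)
        rw [hdrop]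
        simp [hp]
      · rw [show (-((k+1:Nat):Int)+1) = -((k:Nat):Int) by push_cast; ring]
        rw [ih f _ hk0 (by omega) (by omega)]
        have hsh : cs.length - (k+1) + 1 = cs.length - k := by omega
        rw [hsh]
        cases hall : (cs.drop (cs.length - k)).all pred with
        | true =>
          rw [if_pos rfl, if_pos (by simp [List.all_cons, hp, hall])]
          simp
        | false =>
          rw [if_neg (by simp [hall])]
          rw [if_neg (by simp only [List.all_cons, hall, Bool.and_false]; exact Bool.false_ne_true)]
          rw [List.takeWhile_cons, hp]
          simp

lemma take_findIdx_eq_takeWhile (pred : Char → Bool) (xs : List Char) :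
    xs.take ((xs.findIdx? (fun ch => !pred ch)).getD xs.length) = xs.takeWhile pred := by
  induction xs with
  | nil => simp
  | cons x xs ih =>
    rw [List.findIdx?_cons]
    cases hp : pred x with
    | false => simp [hp]
    | true =>
      simp only [hp, Bool.not_true, List.takeWhile_cons, Bool.false_eq_true, if_false, if_true,
        List.length_cons]
      cases h : xs.findIdx? (fun ch => !pred ch) with
      | none =>
        rw [h] at ih
        simp only [h, Option.map_none, Option.getD_none, List.take_succ_cons, List.take_length]
        simp only [Option.getD_none, List.take_length] at ih
        rw [← ih]
      | some n =>
        rw [h] at ih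
        simp only [h, Option.map_some, Option.getD_some, List.take_succ_cons]
        simp only [Option.getD_some] at ih
        rw [ih]

lemma takeWhile_eq_self_of_all (pred : Char → Bool) (l : List Char) (h : l.all pred = true) :
    l.takeWhile pred = l := by
  induction l with
  | nil => rfl
  | cons x xs ih => simp_all

lemma takeWhile_eq_nil_of_head (pred : Char → Bool) (l : List Char) (h0 : 0 < l.length)
    (h : pred l[0] = false) : l.takeWhile pred = [] := by
  cases l with
  | nil => rfl
  | cons x xs => simp_all

lemma takeWhile_ne_nil_of_head (pred : Char → Bool) (l : List Char) (h0 : 0 < l.length)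
    (h : pred l[0] = true) : l.takeWhile pred ≠ [] := by
  cases l with
  | nil => simp at h0
  | cons x xs => simp_all

lemma alpha_of_not_digit (c : Char) (h : PySem.Chars.isdigit c = true) :
    PySem.Chars.isalpha c = false := by
  rw [Bool.eq_false_iff]
  intro hc
  unfold PySem.Chars.isalpha PySem.Chars.isupper PySem.Chars.islower at hc
  unfold PySem.Chars.isdigit at h
  simp only [Bool.or_eq_true, Bool.and_eq_true, decide_eq_true_eq, Char.le_def,
    UInt32.le_iff_toNat_le] at h hc
  simp only [show ('a'.val.toNat)=97 from rfl, show ('b'.val.toNat)=98 from rfl, show ('c'.val.toNat)=99 from rfl, show ('d'.val.toNat)=100 from rfl, show ('e'.val.toNat)=101 from rfl, show ('f'.val.toNat)=102 from rfl, show ('g'.val.toNat)=103 from rfl, show ('h'.val.toNat)=104 from rfl, show ('i'.val.toNat)=105 from rfl, show ('j'.val.toNat)=106 from rfl, show ('k'.val.toNat)=107 from rfl, show ('l'.val.toNat)=108 from rfl, show ('m'.val.toNat)=109 from rfl, show ('n'.val.toNat)=110 from rfl, show ('o'.val.toNat)=111 from rfl, show ('p'.val.toNat)=112 from rfl, show ('q'.val.toNat)=113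 from rfl, show ('r'.val.toNat)=114 from rfl, show ('s'.val.toNat)=115 from rfl, show ('t'.val.toNat)=116 from rfl, show ('u'.val.toNat)=117 from rfl, show ('v'.val.toNat)=118 from rfl, show ('w'.val.toNat)=119 from rfl, show ('x'.val.toNat)=120 from rfl, show ('y'.val.toNat)=121 from rfl, show ('z'.val.toNat)=122 from rfl, show ('A'.val.toNat)=65 from rfl, show ('B'.val.toNat)=66 from rfl, show ('C'.val.toNat)=67 from rfl, show ('D'.val.toNat)=68 from rfl, show ('E'.val.toNat)=69 from rfl, show ('F'.val.toNat)=70 from rfl, show ('G'.val.toNat)=71 from rfl, show ('H'.val.toNat)=72 from rfl, show ('I'.val.toNat)=73 from rfl, show ('J'.val.toNat)=74 from rfl, show ('K'.val.toNat)=75 from rfl, show ('L'.val.toNat)=76 from rfl, show ('M'.val.toNat)=77 from rfl, show ('N'.val.toNat)=78 from rfl, show ('O'.val.toNat)=79 from rfl, show ('P'.val.toNat)=80 from rfl, show ('Q'.val.toNat)=81 from rfl, show ('R'.val.toNat)=82 from rfl, show ('S'.val.toNat)=83 from rfl, show ('T'.val.toNat)=84 from rfl, show ('U'.val.toNat)=85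 from rfl, show ('V'.val.toNat)=86 from rfl, show ('W'.val.toNat)=87 from rfl, show ('X'.val.toNat)=88 from rfl, show ('Y'.val.toNat)=89 from rfl, show ('Z'.val.toNat)=90 from rfl, show ('0'.val.toNat)=48 from rfl, show ('1'.val.toNat)=49 from rfl, show ('2'.val.toNat)=50 from rfl, show ('3'.val.toNat)=51 from rfl, show ('4'.val.toNat)=52 from rfl, show ('5'.val.toNat)=53 from rfl, show ('6'.val.toNat)=54 from rfl, show ('7'.val.toNat)=55 from rfl, show ('8'.val.toNat)=56 from rfl, show ('9'.val.toNat)=57 from rfl] at h hc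
  omega

lemma getD_zero_append_drop (cs : List Char) (q : Nat) (c : Char) (h : q < cs.length) :
    ((cs.drop q) ++ [c]).getD 0 ' ' = cs[q] := by
  rw [List.getD_eq_getElem _ _ (by simp only [List.length_append, List.length_drop]; omega)]
  rw [List.getElem_append_left (by simp only [List.length_drop]; omega)]
  rw [show (cs.drop q)[0]'(by simp only [List.length_drop]; omega) = cs[q+0]'(by omega) from List.getElem_drop]
  simp

lemma all_append_single (l : List Char) (c : Char) (P : Char → Bool) :
    (l ++ [c]).all P = (l.all P && P c) := by simp

lemma self_mem_drop (cs : List Char) (q : Nat) (h : q < cs.length) : cs[q] ∈ cs.drop q := by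
  have h0 : 0 < (cs.drop q).length := by simp only [List.length_drop]; omega
  have e : (cs.drop q)[0]'h0 = cs[q+0]'(by omega) := List.getElem_drop
  simp only [Nat.add_zero] at e
  rw [← e]
  exact List.getElem_mem h0

-- ===== VERDICT (by name: the statement is the Claim_ definition above) =====
theorem next_sep_spec : Claim_unchanged_next_sep := by
  intro s p _ hpre
  unfold Spec_next_sep
  intro hnd
  obtain ⟨hlo, hhi⟩ := hpre
  by_cases hp0 : 0 ≤ p
  · -- 0 ≤ p < len: both sides scan the same suffix
    have hq : p = ((p.toNat : Nat) : Int) := by omega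
    have hqn : p.toNat < s.toList.length := by omega
    simp only [next_sep, next_sep_alt,
      PySem.List.pyGet?_eq_some_getElem _ hp0 hhi, PySem.List.slice_from _ hp0,
      pvAlphaA_fun, pvNumA_fun, pvAlnumA_fun, pvIsAlphaB_fun, pvIsDigitB_fun, pvIsAlnumB_fun]
    have hmax : (max p 0).toNat = p.toNat := by omega
    split_ifs with h1 h2
    · rw [take_findIdx_eq_takeWhile]
      rw [hq, pvLoopA_nonneg _ _ _ _ _ (by omega)]
      simp [hmax]
    · rw [take_findIdx_eq_takeWhile]
      rw [hq, pvLoopA_nonneg _ _ _ _ _ (by omega)]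
      simp [hmax]
    · rfl
  · -- negative p: A may wrap; outside D_ the wrap contributes nothing
    replace hp0 : p < 0 := by omega
    have hk1 : 0 < (-p).toNat := by omega
    have hk2 : (-p).toNat ≤ s.toList.length := by omega
    have hkp : p = -(((-p).toNat : Nat) : Int) := by omega
    have hidx : s.toList.length - (-p).toNat < s.toList.length := by omega
    have h0 : 0 < s.toList.length := by omega
    simp only [next_sep, next_sep_alt]
    rw [hkp]
    rw [PySem.List.pyGet?_neg_natCast _ _ hk1 hk2]
    rw [List.getElem?_eq_getElem hidx]
    rw [PySem.List.slice_some_none]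
    rw [PySem.List.clampIdx_neg_natCast _ _ hk1]
    simp only [pvAlphaA_fun, pvNumA_fun, pvAlnumA_fun, pvIsAlphaB_fun, pvIsDigitB_fun, pvIsAlnumB_fun]
    have hfuel : (-p).toNat + s.toList.length < (((s.toList.length : Int) - -(((-p).toNat : Nat) : Int))).toNat + 1 := by omega
    split_ifs with h1 h2
    · rw [take_findIdx_eq_takeWhile]
      rw [pvLoopA_neg _ _ _ _ _ hk1 hk2 hfuel]
      cases hall : (s.toList.drop (s.toList.length - (-p).toNat)).all PySem.Chars.isalnum with
      | true =>
        rw [if_pos rfl]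
        have hhead : PySem.Chars.isalnum (s.toList[0]) = false := by
          cases hic : PySem.Chars.isalnum (s.toList[0]) with
          | false => rfl
          | true =>
            exfalso
            apply hnd
            simp only [D_next_sep]
            refine ⟨hp0, hlo, Or.inl ⟨?_, ?_⟩⟩
            · rw [getD_zero_append_drop _ _ _ hidx]
              exact h1
            · rw [all_append_single, hall, List.getD_eq_getElem _ _ h0, hic]
              rfl
        rw [takeWhile_eq_nil_of_head _ _ h0 hhead]
        rw [takeWhile_eq_self_of_all _ _ hall]
        simp
      | false =>
        rw [if_neg (by simp)]
        simp
    · rw [take_findIdx_eq_takeWhile]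
      rw [pvLoopA_neg _ _ _ _ _ hk1 hk2 hfuel]
      cases hall : (s.toList.drop (s.toList.length - (-p).toNat)).all PySem.Chars.isdigit with
      | true =>
        rw [if_pos rfl]
        have hhead : PySem.Chars.isdigit (s.toList[0]) = false := by
          cases hic : PySem.Chars.isdigit (s.toList[0]) with
          | false => rfl
          | true =>
            exfalso
            apply hnd
            simp only [D_next_sep]
            refine ⟨hp0, hlo, Or.inr ?_⟩
            rw [all_append_single, hall, List.getD_eq_getElem _ _ h0, hic]
            rfl
        rw [takeWhile_eq_nil_of_head _ _ h0 hhead]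
        rw [takeWhile_eq_self_of_all _ _ hall]
        simp
      | false =>
        rw [if_neg (by simp)]
        simp
    · rfl

theorem next_sep_changed : Claim_changed_next_sep := by
  unfold Claim_changed_next_sep; decide

theorem next_sep_tight : Claim_exact_next_sep := by
  intro s p _ hpre hd
  obtain ⟨hlo, hhi⟩ := hpre
  simp only [D_next_sep] at hd
  obtain ⟨hp0, _, hXY⟩ := hd
  have hk1 : 0 < (-p).toNat := by omega
  have hk2 : (-p).toNat ≤ s.toList.length := by omega
  have hkp : p = -(((-p).toNat : Nat) : Int) := by omega
  have hidx : s.toList.length - (-p).toNat < s.toList.length := by omega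
  have h0 : 0 < s.toList.length := by omega
  rw [getD_zero_append_drop _ _ _ hidx] at hXY
  simp only [all_append_single, List.getD_eq_getElem _ _ h0] at hXY
  simp only [next_sep, next_sep_alt]
  rw [hkp]
  rw [PySem.List.pyGet?_neg_natCast _ _ hk1 hk2]
  rw [List.getElem?_eq_getElem hidx]
  rw [PySem.List.slice_some_none]
  rw [PySem.List.clampIdx_neg_natCast _ _ hk1]
  simp only [pvAlphaA_fun, pvNumA_fun, pvAlnumA_fun, pvIsAlphaB_fun, pvIsDigitB_fun, pvIsAlnumB_fun]
  have hfuel : (-p).toNat + s.toList.length < (((s.toList.length : Int) - -(((-p).toNat : Nat) : Int))).toNat + 1 := by omega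
  split_ifs with h1 h2
  · -- letter branch: A carries the wrapped front run, B does not
    have hX : (List.drop (s.toList.length - (-p).toNat) s.toList).all PySem.Chars.isalnum = true ∧
        PySem.Chars.isalnum (s.toList[0]) = true := by
      rcases hXY with ⟨_, hb⟩ | hb
      · exact (Bool.and_eq_true _ _).mp hb
      · exfalso
        have hdig : PySem.Chars.isdigit (s.toList[s.toList.length - (-p).toNat]) = true :=
          List.all_eq_true.mp ((Bool.and_eq_true _ _).mp hb).1 _ (self_mem_drop _ _ hidx)
        have hf := alpha_of_not_digit _ hdig
        rw [h1] at hf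
        exact absurd hf (by decide)
    obtain ⟨hall, h0n⟩ := hX
    rw [take_findIdx_eq_takeWhile, pvLoopA_neg _ _ _ _ _ hk1 hk2 hfuel, if_pos hall]
    rw [takeWhile_eq_self_of_all _ _ hall]
    intro heq
    have hl := String.ofList_inj.mp heq
    have hlen := congrArg List.length hl
    simp only [List.length_append, List.nil_append] at hlen
    have : (s.toList.takeWhile PySem.Chars.isalnum).length = 0 := by omega
    exact takeWhile_ne_nil_of_head _ _ h0 h0n (List.eq_nil_of_length_eq_zero this)
  · -- digit branch
    have hY : (List.drop (s.toList.length - (-p).toNat) s.toList).all PySem.Chars.isdigit = true ∧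
        PySem.Chars.isdigit (s.toList[0]) = true := by
      rcases hXY with ⟨ha, _⟩ | hb
      · exact absurd ha h1
      · exact (Bool.and_eq_true _ _).mp hb
    obtain ⟨hall, h0n⟩ := hY
    rw [take_findIdx_eq_takeWhile, pvLoopA_neg _ _ _ _ _ hk1 hk2 hfuel, if_pos hall]
    rw [takeWhile_eq_self_of_all _ _ hall]
    intro heq
    have hl := String.ofList_inj.mp heq
    have hlen := congrArg List.length hl
    simp only [List.length_append, List.nil_append] at hlen
    have : (s.toList.takeWhile PySem.Chars.isdigit).length = 0 := by omega
    exact takeWhile_ne_nil_of_head _ _ h0 h0n (List.eq_nil_of_length_eq_zero this)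
  · -- neither branch: D_ cannot hold
    rcases hXY with ⟨ha, _⟩ | hb
    · exact absurd ha h1
    · exact absurd (List.all_eq_true.mp ((Bool.and_eq_true _ _).mp hb).1 _ (self_mem_drop _ _ hidx)) h2
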